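-- pv_equiv track=rewrite | github.com/engerlab/HNC_Reports_Agents | utils/sample_selection.py | define_subbins
-- ===== SOURCE A (Python) =====
-- def define_subbins(start_val, end_val, n_subbins=2):
--     """
--     Helper to define sub-bins from start_val..end_val inclusive.
--     Example: if start=0, end=9, n_subbins=2 => [(0,4), (5,9)]
--     If n_subbins=3 => [(0,3), (4,6), (7,9)] etc.
--     """
--     if start_val> end_val:
--         return []
--     # how wide each sub-bin is:
--     total_range = end_val - start_val + 1
--     # e.g. for total_range=10, sub-bins=2 => each is about 5 wide
--     # for sub-bins=3 => each is about 3 or 4 wide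
--     step = total_range // n_subbins
--     bins = []
--     current_low = start_val
--     for i in range(n_subbins):
--         # for the last bin, we go up to end_val
--         if i == n_subbins-1:
--             current_high = end_val
--         else:
--             current_high = current_low + step - 1
--         # in case step=0 or negative, guard
--         if current_high < current_low:
--             break
--         bins.append((current_low, current_high))
--         current_low = current_high+1
--     # e.g. if total_range=10, n_subbins=2 => step=5 => bins => (0,4),(5,9)
--     return bins
-- ===== SOURCE B (Python) =====
-- def define_subbins(start_val, end_val, n_subbins=2):
--     if start_val > end_val:
--         return []
--     step = (end_val - start_val + 1) // n_subbins
--     if step <= 0: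
--         return []
--
--     def go(lo, hi, k):
--         # divide and conquer: split the k sub-bins into two halves
--         if k == 1:
--             return [(lo, hi)]
--         m = k // 2
--         mid = lo + m * step
--         return go(lo, mid - 1, m) + go(mid, hi, k - m)
--
--     return go(start_val, end_val, n_subbins)
-- ===== Notes on version B (the rewrite author's own statement) =====
-- stated objective: alternative
-- what changed: Replaces A's linear stateful accumulator loop (with break) by a binary divide-and-conquer recursion that splits the k sub-bins into two halves and concatenates the recursive results; a step<=0 guard replaces the loop's immediate break / empty range.
import Mathlib
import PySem

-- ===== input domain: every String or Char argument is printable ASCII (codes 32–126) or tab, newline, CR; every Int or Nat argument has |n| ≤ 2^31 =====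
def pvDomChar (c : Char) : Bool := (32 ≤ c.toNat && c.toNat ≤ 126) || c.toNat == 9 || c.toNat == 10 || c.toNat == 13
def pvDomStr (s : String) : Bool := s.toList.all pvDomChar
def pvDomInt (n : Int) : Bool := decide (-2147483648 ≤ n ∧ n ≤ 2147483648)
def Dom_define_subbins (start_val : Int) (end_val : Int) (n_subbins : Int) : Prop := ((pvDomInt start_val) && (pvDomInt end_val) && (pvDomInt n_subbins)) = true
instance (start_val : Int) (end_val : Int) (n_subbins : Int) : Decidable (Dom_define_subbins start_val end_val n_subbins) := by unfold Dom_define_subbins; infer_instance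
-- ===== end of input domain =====

-- B replaces A's linear accumulator loop by a binary divide-and-conquer recursion; return values only.

-- ===== PORT A =====
-- the for-loop with break: state (current_low, bins); 'break' returns bins as-is
def define_subbins_loop (n_subbins : Int) (end_val : Int) (step : Int) :
    List Int → Int → List (Int × Int) → List (Int × Int)
  | [], _, bins => bins
  | i :: rest, current_low, bins =>
    let current_high := if i = n_subbins - 1 then end_val else current_low + step - 1
    if current_high < current_low then bins
    else define_subbins_loop n_subbins end_val step rest (current_high + 1) (bins ++ [(current_low, current_high)])

def define_subbins (start_val : Int) (end_val : Int) (n_subbins : Int) : List (Int × Int) :=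
  if start_val > end_val then []
  else
    let total_range := end_val - start_val + 1
    let step := PySem.Int.floordiv total_range n_subbins
    define_subbins_loop n_subbins end_val step (PySem.List.pyRange 0 n_subbins 1) start_val []

-- ===== PORT B =====
-- 'go' of Source B; every reachable call has k ≥ 1, the 'k ≤ 1' form of the k == 1 test only makes the
-- Lean recursion total (Python's go is never called with k < 1 from define_subbins)
def dsGo (step : Int) (lo hi k : Int) : List (Int × Int) :=
  if k ≤ 1 then [(lo, hi)]
  else
    dsGo step lo (lo + PySem.Int.floordiv k 2 * step - 1) (PySem.Int.floordiv k 2) ++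
      dsGo step (lo + PySem.Int.floordiv k 2 * step) hi (k - PySem.Int.floordiv k 2)
termination_by k.toNat
decreasing_by
  all_goals
    simp only [PySem.Int.floordiv_eq_ediv_of_pos (show (0:Int) < 2 by omega)]
    omega

def define_subbins_alt (start_val : Int) (end_val : Int) (n_subbins : Int) : List (Int × Int) :=
  if start_val > end_val then []
  else
    let step := PySem.Int.floordiv (end_val - start_val + 1) n_subbins
    if step ≤ 0 then []
    else dsGo step start_val end_val n_subbins

-- ===== PRECONDITION & SPEC =====
-- n_subbins = 0 makes 'total_range // n_subbins' raise ZeroDivisionError in A (and in B),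
-- except when start_val > end_val, where both return [] before dividing
def Pre_define_subbins (start_val : Int) (end_val : Int) (n_subbins : Int) : Prop := n_subbins ≠ 0 ∨ start_val > end_val
instance (start_val : Int) (end_val : Int) (n_subbins : Int) : Decidable (Pre_define_subbins start_val end_val n_subbins) := by unfold Pre_define_subbins; infer_instance
def pvWitness_define_subbins : Int × Int × Int := (0, 9, 2)

def Spec_define_subbins (start_val : Int) (end_val : Int) (n_subbins : Int) (out : List (Int × Int)) : Prop := out = define_subbins_alt start_val end_val n_subbins
instance (start_val : Int) (end_val : Int) (n_subbins : Int) (out : List (Int × Int)) : Decidable (Spec_define_subbins start_val end_val n_subbins out) := by unfold Spec_define_subbins; infer_instance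

-- ===== CLAIM (what is proved, stated in full; the proofs are below) =====
def Claim_equal_define_subbins : Prop := ∀ (start_val : Int) (end_val : Int) (n_subbins : Int), Dom_define_subbins start_val end_val n_subbins → Pre_define_subbins start_val end_val n_subbins → Spec_define_subbins start_val end_val n_subbins (define_subbins start_val end_val n_subbins)

-- ===== LEMMAS AND PROOFS =====

-- the common normal form: bin i is (s+i*step, s+(i+1)*step-1), last bin ends at e
def binsFrom (s e step : Int) (n : Int) : List Int → List (Int × Int) :=
  List.map (fun i => (s + i * step, if i = n - 1 then e else s + (i + 1) * step - 1))

-- A's loop, started at index k with low = s + k*step, produces the normal form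
theorem loopA_eq (n e step s : Int) (hstep : 1 ≤ step) (hlast : s + (n - 1) * step ≤ e) :
    ∀ (m : Nat) (k : Int) (bins : List (Int × Int)), 0 ≤ k → k ≤ n → (n - k).toNat = m →
      define_subbins_loop n e step (PySem.List.pyRange k n 1) (s + k * step) bins
        = bins ++ binsFrom s e step n (PySem.List.pyRange k n 1) := by
  intro m
  induction m with
  | zero =>
    intro k bins hk0 hkn hm
    have hnk : n ≤ k := by omega
    rw [PySem.List.pyRange_one_eq_nil hnk]
    simp [define_subbins_loop, binsFrom]
  | succ m ih =>
    intro k bins hk0 hkn hm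
    have hkn' : k < n := by omega
    rw [PySem.List.pyRange_one_cons hkn']
    by_cases hk : k = n - 1
    · subst hk
      have hrest : PySem.List.pyRange (n - 1 + 1) n 1 = [] := PySem.List.pyRange_one_eq_nil (by omega)
      rw [hrest]
      simp only [define_subbins_loop]
      rw [if_neg (by omega)]
      simp [binsFrom]
    · have hhigh : ¬ (s + k * step + step - 1 < s + k * step) := by omega
      simp only [define_subbins_loop, if_neg hk, hhigh, if_false]
      have hlow' : s + k * step + step - 1 + 1 = s + (k + 1) * step := by ring
      rw [hlow', ih (k + 1) (bins ++ [(s + k * step, s + k * step + step - 1)]) (by omega) (by omega) (by omega)]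
      simp only [binsFrom, List.map_cons, if_neg hk, List.append_assoc]
      have : s + (k + 1) * step - 1 = s + k * step + step - 1 := by ring
      rw [this]
      rfl

-- B's divide-and-conquer, on k ≥ 1 bins, produces the same normal form
theorem dsGo_eq (step : Int) :
    ∀ (fuel : Nat) (lo hi k : Int), 1 ≤ k → k.toNat ≤ fuel →
      dsGo step lo hi k = binsFrom lo hi step k (PySem.List.pyRange 0 k 1) := by
  intro fuel
  induction fuel with
  | zero => intro lo hi k hk hf; omega
  | succ fuel ih =>
    intro lo hi k hk hf
    rw [dsGo]
    by_cases h1 : k ≤ 1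
    · have hk1 : k = 1 := by omega
      subst hk1
      rw [if_pos (by omega)]
      rw [PySem.List.pyRange_one_cons (by omega : (0:Int) < 1),
          PySem.List.pyRange_one_eq_nil (by omega : (1:Int) ≤ 0 + 1)]
      simp [binsFrom]
    · rw [if_neg h1]
      have hm : PySem.Int.floordiv k 2 = k / 2 := PySem.Int.floordiv_eq_ediv_of_pos (by omega)
      set m := PySem.Int.floordiv k 2 with hmdef
      have hm1 : 1 ≤ m := by rw [hm]; omega
      have hmk : m < k := by rw [hm]; omega
      rw [ih lo (lo + m * step - 1) m hm1 (by omega),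
          ih (lo + m * step) hi (k - m) (by omega) (by omega)]
      -- split the index range of the normal form at m
      rw [PySem.List.pyRange_one_append 0 m k (by omega) (by omega)]
      unfold binsFrom
      rw [List.map_append]
      congr 1
      · -- left half: indices 0..m-1; end of the half is lo + m*step - 1, matching the i+1 formula
        apply List.map_congr_left
        intro i hi'
        have hmem := (PySem.List.mem_pyRange_one).1 hi'
        by_cases him : i = m - 1
        · subst him
          rw [if_pos rfl, if_neg (by omega)]
          have : lo + (m - 1 + 1) * step - 1 = lo + m * step - 1 := by ring
          rw [this]
        · rw [if_neg him, if_neg (by omega)]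
      · -- right half: reindex pyRange 0 (k-m) against pyRange m k via List.range
        rw [PySem.List.pyRange_one 0 (k - m), PySem.List.pyRange_one m k]
        rw [List.map_map, List.map_map, show k - m - 0 = k - m by ring]
        apply List.map_congr_left
        intro j hj
        simp only [List.mem_range] at hj
        have hjlt : (j : Int) < k - m := by
          have := hj; omega
        simp only [Function.comp]
        by_cases hlast : (0 : Int) + j = k - m - 1
        · rw [if_pos hlast, if_pos (by omega)]
          simp only [Prod.mk.injEq]
          constructor <;> first | ring | trivial
        · rw [if_neg hlast, if_neg (by omega)]
          simp only [Prod.mk.injEq]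
          constructor <;> first | ring | trivial

-- ===== VERDICT (by name: the statement is the Claim_ definition above) =====
theorem define_subbins_spec : Claim_equal_define_subbins := by
  intro s e n _ hn
  unfold Pre_define_subbins at hn
  unfold Spec_define_subbins define_subbins define_subbins_alt
  by_cases hse : s > e
  · simp [hse]
  · have hn0 : n ≠ 0 := by
      rcases hn with h | h
      · exact h
      · exact absurd h hse
    clear hn
    simp only [if_neg hse]
    by_cases hnpos : n ≤ 0
    · have hr : PySem.List.pyRange 0 n 1 = [] := PySem.List.pyRange_one_eq_nil (by omega)
      rw [hr]
      have hmn := PySem.Int.floordiv_mul_add_mod (e - s + 1) n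
      have hb := PySem.Int.mod_neg_bounds (a := e - s + 1) (b := n) (by omega)
      set step := PySem.Int.floordiv (e - s + 1) n with hstepdef
      have hle : s ≤ e := by omega
      have hstepneg : step ≤ 0 := by
        by_contra hpos
        push Not at hpos
        have hx : step * n < 0 := mul_neg_of_pos_of_neg hpos (by omega)
        linarith [hb.2, hmn, hx, hle]
      rw [if_pos hstepneg]
      simp [define_subbins_loop]
    · push Not at hnpos
      set step := PySem.Int.floordiv (e - s + 1) n with hstepdef
      have htot : 1 ≤ e - s + 1 := by omega
      have hdiv : step = (e - s + 1) / n := PySem.Int.floordiv_eq_ediv_of_pos hnpos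
      have hstep0 : 0 ≤ step := by rw [hdiv]; exact Int.ediv_nonneg (by omega) (by omega)
      have hmul : step * n ≤ e - s + 1 := by
        have h := PySem.Int.floordiv_mul_add_mod (e - s + 1) n
        have hm := PySem.Int.mod_nonneg (e - s + 1) hnpos
        rw [← hstepdef] at h
        omega
      by_cases h0 : step = 0
      · -- B returns []; A breaks on the first iteration (n ≥ 2 forced)
        have hn2 : 2 ≤ n := by
          by_contra h
          have hn1 : n = 1 := by omega
          rw [hn1] at hdiv
          simp at hdiv
          omega
        rw [if_pos (by omega), PySem.List.pyRange_one_cons (by omega : (0:Int) < n)]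
        simp only [define_subbins_loop]
        rw [if_neg (by omega : ¬ (0:Int) = n - 1)]
        rw [if_pos (by omega : s + step - 1 < s)]
      · have hstep1 : 1 ≤ step := by omega
        have hlast : s + (n - 1) * step ≤ e := by nlinarith
        rw [if_neg (by omega)]
        have hA := loopA_eq n e step s hstep1 hlast (n - 0).toNat 0 [] le_rfl (by omega) rfl
        have hB := dsGo_eq step n.toNat s e n hnpos (by omega)
        simp only [zero_mul, add_zero] at hA
        rw [hA, hB]
        simp [binsFrom]
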